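-- pv_equiv track=rewrite | github.com/BaquarAbbas/30-days-of-code- | Day16:RestructiveCandyCrush.py | Reduced_String
-- ===== SOURCE A (Python) =====
-- def Reduced_String(k, s):
--     stack = []
--     emp = ''
--     if k == 1:
--         return emp
--     for i in range(len(s)):
--         if stack and s[i] == stack[-1][0]:
--             stack[-1][1] += 1
--             if stack[-1][1] == k:
--                 stack.pop()
--         else:
--             stack.append([s[i],1])
--
--     out = ''
--     while stack:
--         char,freq = stack.pop()
--         out += (char * freq)
--
--     return out[::-1]
-- ===== SOURCE B (Python) =====
-- # Pre_ excludes k <= 0: there A accidentally returns s unchanged, while B's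
-- # scan-and-remove loop never terminates (or raises on empty s).
-- def Reduced_String(k, s):
--     if k == 1:
--         return ''
--     found = True
--     while found:
--         found = False
--         for i in range(len(s) - k + 1):
--             if s[i:i+k] == s[i] * k:
--                 s = s[:i] + s[i+k:]
--                 found = True
--                 break
--     return s
-- ===== Notes on version B (the rewrite author's own statement) =====
-- stated objective: alternative
-- what changed: Replaces the single-pass counting stack by naive repeated scanning: find the first window of k equal characters, delete it, restart the scan, until no such window remains.
-- outside the precondition, e.g. on Reduced_String(0, 'ab'): A returns 'ab', B does not finish within the time limit
import Mathlib
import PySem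

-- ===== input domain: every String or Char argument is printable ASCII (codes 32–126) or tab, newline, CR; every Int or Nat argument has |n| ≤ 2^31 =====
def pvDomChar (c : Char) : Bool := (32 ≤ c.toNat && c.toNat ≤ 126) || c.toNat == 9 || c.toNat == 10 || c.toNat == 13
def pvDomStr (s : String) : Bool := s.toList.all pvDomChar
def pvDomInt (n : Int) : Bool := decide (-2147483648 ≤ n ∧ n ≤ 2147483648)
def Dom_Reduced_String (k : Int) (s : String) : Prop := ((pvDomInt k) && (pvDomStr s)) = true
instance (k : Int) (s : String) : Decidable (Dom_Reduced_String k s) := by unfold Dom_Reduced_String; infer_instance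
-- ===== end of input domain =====

-- B differs from A structurally: naive repeated scan-and-remove instead of a one-pass
-- counting stack ("alternative" objective; B is not claimed faster).

-- ===== PORT A =====
-- Python's stack appends/pops at the END of its list; here the stack is kept
-- head-as-top (list reversed), the standard faithful encoding.
def pvStepA (k : Int) (stack : List (Char × Int)) (c : Char) : List (Char × Int) :=
  match stack with
  | (c0, f) :: rest =>
      if c = c0 then
        if f + 1 = k then rest           -- stack[-1][1] += 1; == k → pop
        else (c0, f + 1) :: rest
      else (c, 1) :: (c0, f) :: rest     -- append [s[i], 1]
  | [] => [(c, 1)]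

-- the out-building loop: while stack: char,freq = stack.pop(); out += char*freq
-- (char * freq with freq < 0 is '' in Python, hence Int.toNat)
def pvOutA : List (Char × Int) → List Char → List Char
  | [], out => out
  | (c, f) :: rest, out => pvOutA rest (out ++ List.replicate f.toNat c)

def Reduced_String (k : Int) (s : String) : String :=
  if k = 1 then "" else
    String.ofList ((pvOutA (s.toList.foldl (pvStepA k) []) []).reverse)   -- out[::-1]

-- ===== PORT B =====
-- first i with s[i:i+k] == s[i]*k; Python's range(len(s)-k+1) is empty when
-- len(s)-k+1 ≤ 0, which l.length + 1 - K reproduces exactly (Nat subtraction)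
def pvFindRunB (K : Nat) (l : List Char) : Option Nat :=
  (List.range (l.length + 1 - K)).find?
    (fun i => (l.drop i).take K == List.replicate K (l.getD i ' '))

-- the `while found` loop; fuel bounds the iterations (each removal shortens s by k ≥ 2,
-- so length-many iterations always suffice on the admitted inputs)
def pvLoopB (K : Nat) : Nat → List Char → List Char
  | 0, l => l
  | fuel + 1, l =>
    match pvFindRunB K l with
    | none => l
    | some i => pvLoopB K fuel (l.take i ++ l.drop (i + K))   -- s = s[:i] + s[i+k:]

def Reduced_String_alt (k : Int) (s : String) : String :=
  if k = 1 then "" else String.ofList (pvLoopB k.toNat s.toList.length s.toList)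

-- ===== PRECONDITION & SPEC =====
-- Pre_ excludes k ≤ 0: there A accidentally returns s unchanged, while B's
-- scan-and-remove loop never terminates (or raises IndexError on empty s with k = 0).
def Pre_Reduced_String (k : Int) (s : String) : Prop := 1 ≤ k
instance (k : Int) (s : String) : Decidable (Pre_Reduced_String k s) := by
  unfold Pre_Reduced_String; infer_instance

def pvWitness_Reduced_String : Int × String := (3, "abbbaac")

def Spec_Reduced_String (k : Int) (s : String) (out : String) : Prop := out = Reduced_String_alt k s
instance (k : Int) (s : String) (out : String) : Decidable (Spec_Reduced_String k s out) := by
  unfold Spec_Reduced_String; infer_instance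

-- ===== CLAIM (what is proved, stated in full; the proofs are below) =====
def Claim_equal_Reduced_String : Prop := ∀ (k : Int) (s : String), Dom_Reduced_String k s → Pre_Reduced_String k s → Spec_Reduced_String k s (Reduced_String k s)

-- ===== LEMMAS AND PROOFS =====

-- the string a stack denotes, in forward (bottom-to-top) order
def pvFlatRev (st : List (Char × Int)) : List Char :=
  (st.reverse.map (fun p => List.replicate p.2.toNat p.1)).flatten

-- invariant of A's stack: counts in [1, k), adjacent entries carry distinct chars
def pvInv (k : Int) (st : List (Char × Int)) : Prop :=
  (∀ p ∈ st, 1 ≤ p.2 ∧ p.2 < k) ∧ (st.map Prod.fst).IsChain (· ≠ ·)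

theorem pvFlatRev_nil : pvFlatRev [] = [] := by simp [pvFlatRev]

theorem pvFlatRev_cons (c : Char) (f : Int) (st : List (Char × Int)) :
    pvFlatRev ((c, f) :: st) = pvFlatRev st ++ List.replicate f.toNat c := by
  simp [pvFlatRev]

theorem pvOutA_eq (st : List (Char × Int)) (out : List Char) :
    pvOutA st out = out ++ (st.map (fun p => List.replicate p.2.toNat p.1)).flatten := by
  induction st generalizing out with
  | nil => simp [pvOutA]
  | cons a rest ih => cases a with
    | mk c f => simp [pvOutA, ih]

theorem pvOutA_reverse (st : List (Char × Int)) :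
    (pvOutA st []).reverse = pvFlatRev st := by
  induction st with
  | nil => simp [pvOutA, pvFlatRev]
  | cons a rest ih =>
      cases a with
      | mk c f =>
        rw [pvOutA_eq] at ih ⊢
        simp only [List.map_cons, List.flatten_cons, List.nil_append, List.reverse_append] at *
        rw [pvFlatRev_cons, ← ih, List.reverse_replicate]

theorem pvInv_step {k : Int} (hk : 2 ≤ k) {st : List (Char × Int)} (h : pvInv k st) (c : Char) :
    pvInv k (pvStepA k st c) := by
  obtain ⟨hb, hc⟩ := h
  cases st with
  | nil =>
      refine ⟨?_, by simp [pvStepA]⟩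
      simp [pvStepA]; omega
  | cons a rest =>
      cases a with
      | mk c0 f =>
        by_cases hcc : c = c0
        · by_cases hfk : f + 1 = k
          · simp only [pvStepA, if_pos hcc, if_pos hfk]
            exact ⟨fun p hp => hb p (List.mem_cons_of_mem _ hp),
              (by simpa using hc.tail)⟩
          · simp only [pvStepA, if_pos hcc, if_neg hfk]
            constructor
            · intro p hp
              rcases List.mem_cons.mp hp with h1 | h1
              · subst h1
                have := hb (c0, f) (List.mem_cons_self ..)
                simp at this ⊢
                omega
              · exact hb p (List.mem_cons_of_mem _ h1)
            · simpa using hc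
        · simp only [pvStepA, if_neg hcc]
          constructor
          · intro p hp
            rcases List.mem_cons.mp hp with h1 | h1
            · subst h1; simp; omega
            · exact hb p h1
          · simp only [List.map_cons] at hc ⊢
            exact List.isChain_cons_cons.mpr ⟨hcc, hc⟩

theorem pvInv_foldl {k : Int} (hk : 2 ≤ k) (l : List Char) :
    ∀ st, pvInv k st → pvInv k (List.foldl (pvStepA k) st l) := by
  induction l with
  | nil => intro st h; simpa using h
  | cons c l ih =>
      intro st h
      simpa [List.foldl_cons] using ih _ (pvInv_step hk h c)

-- processing j further copies of c onto top entry (c, f) when no pop can occur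
theorem pvFill {k : Int} (c : Char) :
    ∀ (j : Nat) (f : Int) (st : List (Char × Int)), 1 ≤ f → f + j < k →
      List.foldl (pvStepA k) ((c, f) :: st) (List.replicate j c) = (c, f + j) :: st := by
  intro j
  induction j with
  | zero => intro f st _ _; simp
  | succ j ih =>
      intro f st hf hlt
      have h1 : f + 1 ≠ k := by push_cast at hlt; omega
      have hstep : pvStepA k ((c, f) :: st) c = (c, f + 1) :: st := by
        simp [pvStepA, h1]
      rw [List.replicate_succ, List.foldl_cons, hstep,
        ih (f + 1) st (by omega) (by push_cast at hlt ⊢; omega)]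
      congr 2
      push_cast; ring

-- processing exactly the copies needed to reach k pops the top entry
theorem pvFillPop {k : Int} (c : Char) :
    ∀ (j : Nat) (f : Int) (st : List (Char × Int)), 1 ≤ f → f + j = k → 1 ≤ j →
      List.foldl (pvStepA k) ((c, f) :: st) (List.replicate j c) = st := by
  intro j
  induction j with
  | zero => intro f st _ _ h; omega
  | succ j ih =>
      intro f st hf heq hj
      rw [List.replicate_succ, List.foldl_cons]
      by_cases hfk : f + 1 = k
      · have hj0 : j = 0 := by push_cast at heq; omega
        simp [pvStepA, hfk, hj0]
      · have hstep : pvStepA k ((c, f) :: st) c = (c, f + 1) :: st := by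
          simp [pvStepA, hfk]
        rw [hstep]
        exact ih (f + 1) st (by omega) (by push_cast at heq ⊢; omega)
          (by push_cast at heq; omega)

-- k copies of c starting on a stack whose top (if any) carries another char: identity
theorem pvFresh {k : Int} (hk : 2 ≤ k) (c : Char) (st : List (Char × Int))
    (h : ∀ c0 f rest, st = (c0, f) :: rest → c0 ≠ c) :
    List.foldl (pvStepA k) st (List.replicate k.toNat c) = st := by
  have hK : k.toNat = 1 + (k.toNat - 1) := by omega
  rw [hK, List.replicate_add, List.foldl_append]
  have hstep : List.foldl (pvStepA k) st (List.replicate 1 c) = (c, 1) :: st := by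
    cases st with
    | nil => simp [pvStepA]
    | cons a rest =>
        cases a with
        | mk c0 f =>
          have : c ≠ c0 := fun hcc => (h c0 f rest rfl) hcc.symm
          simp [pvStepA, this]
  rw [hstep]
  exact pvFillPop c (k.toNat - 1) 1 st (by omega) (by omega) (by omega)

theorem pvRunId {k : Int} (hk : 2 ≤ k) (c : Char) (st : List (Char × Int))
    (hinv : pvInv k st) :
    List.foldl (pvStepA k) st (List.replicate k.toNat c) = st := by
  cases st with
  | nil => exact pvFresh hk c [] (by intro _ _ _ h; simp at h)
  | cons a rest =>
      cases a with
      | mk c0 f =>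
        by_cases hcc : c0 = c
        · subst hcc
          obtain ⟨hb, hch⟩ := hinv
          obtain ⟨hf1, hfk⟩ := hb (c0, f) (List.mem_cons_self ..)
          simp only at hf1 hfk
          have hsplit : k.toNat = (k - f).toNat + (1 + (f.toNat - 1)) := by omega
          rw [hsplit, List.replicate_add, List.foldl_append]
          rw [pvFillPop c0 ((k - f).toNat) f rest hf1 (by omega) (by omega)]
          rw [List.replicate_add, List.foldl_append]
          have hstep : List.foldl (pvStepA k) rest (List.replicate 1 c0) = (c0, 1) :: rest := by
            cases rest with
            | nil => simp [pvStepA]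
            | cons b rest' =>
                cases b with
                | mk c1 f1 =>
                  have hne : c0 ≠ c1 := by
                    simp only [List.map_cons, List.isChain_cons_cons] at hch
                    exact hch.1
                  simp [pvStepA, hne]
          rw [hstep, pvFill c0 (f.toNat - 1) 1 rest (by omega) (by omega)]
          congr 2
          omega
        · exact pvFresh hk c _ (by intro c1 f1 r1 h; cases h; exact hcc)

-- deleting a k-run anywhere does not change A's final stack
theorem pvRemoveId {k : Int} (hk : 2 ≤ k) (c : Char) (pre suf : List Char) :
    List.foldl (pvStepA k) [] (pre ++ List.replicate k.toNat c ++ suf)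
      = List.foldl (pvStepA k) [] (pre ++ suf) := by
  have hinv : pvInv k (List.foldl (pvStepA k) [] pre) :=
    pvInv_foldl hk pre [] ⟨by simp, by simp⟩
  rw [List.foldl_append, List.foldl_append, List.foldl_append,
    pvRunId hk c _ hinv]

def pvNoRun (k : Int) (l : List Char) : Prop :=
  ∀ c : Char, ¬ (List.replicate k.toNat c <:+: l)

-- if the stack's string followed by the rest of the input has no k-run,
-- the fold never pops and just run-length-encodes the input on top of the stack
theorem pvBuild {k : Int} (hk : 2 ≤ k) :
    ∀ (l : List Char) (st : List (Char × Int)), pvInv k st →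
      pvNoRun k (pvFlatRev st ++ l) →
      pvFlatRev (List.foldl (pvStepA k) st l) = pvFlatRev st ++ l := by
  intro l
  induction l with
  | nil => intro st _ _; simp
  | cons c l' ih =>
      intro st hinv hnr
      have hstep : pvFlatRev (pvStepA k st c) = pvFlatRev st ++ [c] := by
        cases st with
        | nil => simp [pvStepA, pvFlatRev]
        | cons a rest =>
            cases a with
            | mk c0 f =>
              obtain ⟨hb, hch⟩ := hinv
              obtain ⟨hf1, hfk⟩ := hb (c0, f) (List.mem_cons_self ..)
              simp only at hf1 hfk
              by_cases hcc : c = c0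
              · by_cases hpop : f + 1 = k
                · exfalso
                  apply hnr c0
                  have hrep : List.replicate k.toNat c0 = List.replicate f.toNat c0 ++ [c0] := by
                    have : k.toNat = f.toNat + 1 := by omega
                    rw [this, List.replicate_succ']
                  refine ⟨pvFlatRev rest, l', ?_⟩
                  rw [pvFlatRev_cons, hrep, hcc]
                  simp
                · simp only [pvStepA, if_pos hcc, if_neg hpop]
                  rw [pvFlatRev_cons, pvFlatRev_cons]
                  have : (f + 1).toNat = f.toNat + 1 := by omega
                  rw [this, List.replicate_succ', hcc, List.append_assoc]
              · simp only [pvStepA, if_neg hcc]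
                rw [pvFlatRev_cons, pvFlatRev_cons]
                simp
      rw [List.foldl_cons, ih (pvStepA k st c) (pvInv_step hk hinv c) ?_, hstep]
      · simp
      · rw [hstep]
        simpa using hnr

theorem pvFind_none {k : Int} (hk : 2 ≤ k) (l : List Char)
    (h : pvFindRunB k.toNat l = none) : pvNoRun k l := by
  intro c hinf
  obtain ⟨p, sfx, hl⟩ := hinf
  set K := k.toNat with hKdef
  have hK2 : 2 ≤ K := by omega
  have hlen : l.length = p.length + K + sfx.length := by
    subst hl; simp [List.length_append]; omega
  have hmem : p.length ∈ List.range (l.length + 1 - K) := by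
    rw [List.mem_range]; omega
  have hdrop : l.drop p.length = List.replicate K c ++ sfx := by
    subst hl; rw [List.append_assoc, List.drop_left]
  have htake : (l.drop p.length).take K = List.replicate K c := by
    rw [hdrop, List.take_append_of_le_length (by simp), List.take_replicate]
    congr 1; omega
  have hget : l.getD p.length ' ' = c := by
    have hsome : l[p.length]? = some c := by
      rw [← List.head?_drop, hdrop]
      have hK1 : K = (K - 1) + 1 := by omega
      rw [hK1, List.replicate_succ]
      simp
    simp [List.getD, hsome]
  have := List.find?_eq_none.mp h p.length hmem
  rw [htake, hget] at this
  simp at this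

theorem pvFind_some {k : Int} (hk : 2 ≤ k) (l : List Char) (i : Nat)
    (h : pvFindRunB k.toNat l = some i) :
    ∃ c : Char, i + k.toNat ≤ l.length ∧
      l = l.take i ++ List.replicate k.toNat c ++ l.drop (i + k.toNat) := by
  set K := k.toNat with hKdef
  have hpred := List.find?_some h
  refine ⟨l.getD i ' ', ?_, ?_⟩
  · have htk : (l.drop i).take K = List.replicate K (l.getD i ' ') := by
      simpa using hpred
    have := congrArg List.length htk
    simp [List.length_take, List.length_drop] at this
    omega
  · have htk : (l.drop i).take K = List.replicate K (l.getD i ' ') := by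
      simpa using hpred
    conv_lhs => rw [← List.take_append_drop i l]
    rw [List.append_assoc]
    congr 1
    rw [← htk]
    conv_lhs => rw [← List.take_append_drop K (l.drop i)]
    congr 1
    rw [List.drop_drop, Nat.add_comm]

def pvAcore (k : Int) (l : List Char) : List Char :=
  pvFlatRev (List.foldl (pvStepA k) [] l)

theorem pvMain {k : Int} (hk : 2 ≤ k) :
    ∀ (fuel : Nat) (l : List Char), l.length ≤ fuel →
      pvAcore k l = pvLoopB k.toNat fuel l := by
  intro fuel
  induction fuel with
  | zero =>
      intro l hl
      have : l = [] := List.length_eq_zero_iff.mp (by omega)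
      subst this
      simp [pvAcore, pvLoopB, pvFlatRev]
  | succ fuel ih =>
      intro l hl
      cases hfind : pvFindRunB k.toNat l with
      | none =>
          rw [pvLoopB, hfind]
          have := pvBuild hk l [] ⟨by simp, by simp⟩
            (by rw [pvFlatRev_nil, List.nil_append]; exact pvFind_none hk l hfind)
          simpa [pvAcore, pvFlatRev_nil] using this
      | some i =>
          have hred : pvLoopB k.toNat (fuel + 1) l
              = pvLoopB k.toNat fuel (l.take i ++ l.drop (i + k.toNat)) := by
            rw [pvLoopB, hfind]
          rw [hred]
          obtain ⟨c, hle, hdec⟩ := pvFind_some hk l i hfind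
          have hlen' : (l.take i ++ l.drop (i + k.toNat)).length ≤ fuel := by
            simp [List.length_take, List.length_drop]
            omega
          rw [← ih _ hlen']
          unfold pvAcore
          conv_lhs => rw [hdec]
          rw [pvRemoveId hk c]

-- ===== VERDICT (by name: the statement is the Claim_ definition above) =====
theorem Reduced_String_spec : Claim_equal_Reduced_String := by
  intro k s _ hpre
  unfold Spec_Reduced_String Reduced_String Reduced_String_alt
  by_cases hk1 : k = 1
  · simp [hk1]
  · have hk : 2 ≤ k := by
      have : (1 : Int) ≤ k := hpre
      omega
    rw [if_neg hk1, if_neg hk1, pvOutA_reverse]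
    congr 1
    exact pvMain hk s.toList.length s.toList le_rfl
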